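-- pv_equiv track=rewrite | github.com/blitzyoo55-ux/hollowforge | hollowforge/backend/app/services/model_compatibility.py | _detect_checkpoint_architecture
-- ===== SOURCE A (Python) =====
-- from typing import Any
--
-- def _detect_checkpoint_architecture(
--     checkpoint_name: str,
--     metadata: dict[str, Any],
--     keys: list[str],
-- ) -> str:
--     arch = str(metadata.get("modelspec.architecture", "")).lower()
--     lower_name = checkpoint_name.lower()
--
--     if "flux" in arch:
--         return "FLUX"
--
--     if any(
--         k.startswith("double_blocks.")
--         or k.startswith("img_in.")
--         or k.startswith("text_encoders.")
--         for k in keys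
--     ):
--         return "FLUX"
--
--     if any(k.startswith("cond_stage_model.") for k in keys):
--         return "SD1.5"
--
--     if checkpoint_name == "svd_xt.safetensors" or any("open_clip.model.visual" in k for k in keys):
--         return "SVD-XT"
--
--     if any(k.startswith("conditioner.embedders.") for k in keys):
--         return "SDXL-family"
--
--     # filename fallback when file path is unresolved
--     if "flux" in lower_name:
--         return "FLUX"
--     if "svd" in lower_name:
--         return "SVD-XT"
--     if "sdxl" in lower_name or "xl" in lower_name:
--         return "SDXL-family"
--
--     return "Unknown"
-- ===== SOURCE B (Python) =====
-- # Rule-table approach: every piece of evidence contributes a numeric priority;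
-- # the answer is the label of the smallest priority collected (9 = no evidence).
-- KEY_RULES = [
--     (1, lambda k: k.startswith(("double_blocks.", "img_in.", "text_encoders."))),
--     (2, lambda k: k.startswith("cond_stage_model.")),
--     (3, lambda k: "open_clip.model.visual" in k),
--     (4, lambda k: k.startswith("conditioner.embedders.")),
-- ]
-- LABELS = {0: "FLUX", 1: "FLUX", 2: "SD1.5", 3: "SVD-XT", 4: "SDXL-family",
--           5: "FLUX", 6: "SVD-XT", 7: "SDXL-family"}
--
-- def _detect_checkpoint_architecture(checkpoint_name, metadata, keys):
--     arch = str(metadata.get("modelspec.architecture", "")).lower()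
--     name = checkpoint_name.lower()
--     candidates = []
--     if "flux" in arch:
--         candidates.append(0)
--     candidates += [p for k in keys for p, pred in KEY_RULES if pred(k)]
--     if checkpoint_name == "svd_xt.safetensors":
--         candidates.append(3)
--     if "flux" in name:
--         candidates.append(5)
--     if "svd" in name:
--         candidates.append(6)
--     if "sdxl" in name or "xl" in name:
--         candidates.append(7)
--     return LABELS.get(min(candidates, default=9), "Unknown")
-- ===== Notes on version B (the rewrite author's own statement) =====
-- stated objective: alternative
-- what changed: Replaces the ordered if-cascade of any()-scans by a data-driven rule table: every piece of evidence (metadata arch, each matching key rule, name patterns) contributes a numeric priority to a candidate list, and the result is the label of the minimum priority collected.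
import Mathlib
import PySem

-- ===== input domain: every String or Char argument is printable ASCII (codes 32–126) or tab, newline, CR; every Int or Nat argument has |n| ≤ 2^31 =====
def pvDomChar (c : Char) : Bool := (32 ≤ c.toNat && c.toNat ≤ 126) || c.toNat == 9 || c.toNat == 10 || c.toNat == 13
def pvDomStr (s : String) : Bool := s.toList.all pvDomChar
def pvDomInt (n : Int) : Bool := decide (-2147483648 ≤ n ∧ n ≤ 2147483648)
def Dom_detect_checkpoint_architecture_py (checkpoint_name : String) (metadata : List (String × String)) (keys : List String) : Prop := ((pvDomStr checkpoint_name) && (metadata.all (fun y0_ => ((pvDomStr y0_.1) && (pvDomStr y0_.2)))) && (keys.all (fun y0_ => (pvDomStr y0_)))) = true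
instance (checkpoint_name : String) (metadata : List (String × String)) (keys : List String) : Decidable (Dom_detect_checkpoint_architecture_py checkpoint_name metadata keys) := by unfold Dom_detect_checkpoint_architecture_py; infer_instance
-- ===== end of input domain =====

-- B classifies via a data-driven rule table: each piece of evidence contributes a numeric priority and the label of the minimum priority collected wins (alternative algorithm, same cost).


-- ===== PORT A =====
def detect_checkpoint_architecture_py (checkpoint_name : String) (metadata : List (String × String)) (keys : List String) : String :=
  let arch := PySem.Str.lower ((PySem.Dict.mk metadata).getD "modelspec.architecture" "")
  let lower_name := PySem.Str.lower checkpoint_name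
  if PySem.Str.isIn "flux" arch then "FLUX"
  else if keys.any (fun k => PySem.Str.startswith k "double_blocks." || PySem.Str.startswith k "img_in." || PySem.Str.startswith k "text_encoders.") then "FLUX"
  else if keys.any (fun k => PySem.Str.startswith k "cond_stage_model.") then "SD1.5"
  else if checkpoint_name == "svd_xt.safetensors" || keys.any (fun k => PySem.Str.isIn "open_clip.model.visual" k) then "SVD-XT"
  else if keys.any (fun k => PySem.Str.startswith k "conditioner.embedders.") then "SDXL-family"
  else if PySem.Str.isIn "flux" lower_name then "FLUX"
  else if PySem.Str.isIn "svd" lower_name then "SVD-XT"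
  else if PySem.Str.isIn "sdxl" lower_name || PySem.Str.isIn "xl" lower_name then "SDXL-family"
  else "Unknown"

-- ===== PORT B =====
-- Source B's KEY_RULES: priority + predicate on a key
def pvKeyRules : List (Nat × (String → Bool)) :=
  [ (1, fun k => PySem.Str.startswith k "double_blocks." || PySem.Str.startswith k "img_in." || PySem.Str.startswith k "text_encoders."),
    (2, fun k => PySem.Str.startswith k "cond_stage_model."),
    (3, fun k => PySem.Str.isIn "open_clip.model.visual" k),
    (4, fun k => PySem.Str.startswith k "conditioner.embedders.") ]

-- Source B's LABELS dict
def pvLabels : List (Nat × String) :=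
  [(0, "FLUX"), (1, "FLUX"), (2, "SD1.5"), (3, "SVD-XT"), (4, "SDXL-family"),
   (5, "FLUX"), (6, "SVD-XT"), (7, "SDXL-family")]

def detect_checkpoint_architecture_py_alt (checkpoint_name : String) (metadata : List (String × String)) (keys : List String) : String :=
  let arch := PySem.Str.lower ((PySem.Dict.mk metadata).getD "modelspec.architecture" "")
  let name := PySem.Str.lower checkpoint_name
  let candidates : List Nat :=
    (if PySem.Str.isIn "flux" arch then [0] else [])
    ++ keys.flatMap (fun k => (pvKeyRules.filter (fun r => r.2 k)).map (·.1))
    ++ (if checkpoint_name == "svd_xt.safetensors" then [3] else [])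
    ++ (if PySem.Str.isIn "flux" name then [5] else [])
    ++ (if PySem.Str.isIn "svd" name then [6] else [])
    ++ (if PySem.Str.isIn "sdxl" name || PySem.Str.isIn "xl" name then [7] else [])
  let best := candidates.foldl Nat.min 9   -- min(candidates, default=9)
  (PySem.Dict.mk pvLabels).getD best "Unknown"

-- ===== PRECONDITION & SPEC =====
def Spec_detect_checkpoint_architecture_py (checkpoint_name : String) (metadata : List (String × String)) (keys : List String) (out : String) : Prop := out = detect_checkpoint_architecture_py_alt checkpoint_name metadata keys
instance (checkpoint_name : String) (metadata : List (String × String)) (keys : List String) (out : String) : Decidable (Spec_detect_checkpoint_architecture_py checkpoint_name metadata keys out) := by unfold Spec_detect_checkpoint_architecture_py; infer_instance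

-- ===== CLAIM (what is proved, stated in full; the proofs are below) =====
def Claim_equal_detect_checkpoint_architecture_py : Prop := ∀ (checkpoint_name : String) (metadata : List (String × String)) (keys : List String), Dom_detect_checkpoint_architecture_py checkpoint_name metadata keys → Spec_detect_checkpoint_architecture_py checkpoint_name metadata keys (detect_checkpoint_architecture_py checkpoint_name metadata keys)

-- ===== LEMMAS AND PROOFS =====

/-- Folding `Nat.min` over the priorities of the rules matching a single key. -/
theorem keyhead_eq (k : String) (b : Nat) (hb : b ≤ 9) :
    ((pvKeyRules.filter (fun r => r.2 k)).map (·.1)).foldl Nat.min b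
    = Nat.min b (Nat.min
        (if PySem.Str.startswith k "double_blocks." || PySem.Str.startswith k "img_in." || PySem.Str.startswith k "text_encoders." then 1 else 9)
        (Nat.min (if PySem.Str.startswith k "cond_stage_model." then 2 else 9)
          (Nat.min (if PySem.Str.isIn "open_clip.model.visual" k then 3 else 9)
            (if PySem.Str.startswith k "conditioner.embedders." then 4 else 9)))) := by
  simp only [pvKeyRules, List.filter_cons, List.filter_nil]
  cases h1 : (PySem.Str.startswith k "double_blocks." || PySem.Str.startswith k "img_in." || PySem.Str.startswith k "text_encoders.") <;>
  cases h2 : PySem.Str.startswith k "cond_stage_model." <;>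
  cases h3 : PySem.Str.isIn "open_clip.model.visual" k <;>
  cases h4 : PySem.Str.startswith k "conditioner.embedders." <;>
    simp <;> omega

/-- Merging the priority summaries of two disjoint pieces of evidence. -/
theorem min_merge (p1 p2 p3 p4 q1 q2 q3 q4 : Bool) :
    Nat.min (Nat.min (if p1 then 1 else 9) (Nat.min (if p2 then 2 else 9) (Nat.min (if p3 then 3 else 9) (if p4 then 4 else 9))))
      (Nat.min (if q1 then 1 else 9) (Nat.min (if q2 then 2 else 9) (Nat.min (if q3 then 3 else 9) (if q4 then 4 else 9))))
    = Nat.min (if p1 || q1 then 1 else 9) (Nat.min (if p2 || q2 then 2 else 9) (Nat.min (if p3 || q3 then 3 else 9) (if p4 || q4 then 4 else 9))) := by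
  revert p1 p2 p3 p4 q1 q2 q3 q4; decide

theorem min_step (b : Nat) (p1 p2 p3 p4 q1 q2 q3 q4 : Bool) :
    Nat.min (Nat.min b (Nat.min (if p1 then 1 else 9) (Nat.min (if p2 then 2 else 9) (Nat.min (if p3 then 3 else 9) (if p4 then 4 else 9)))))
      (Nat.min (if q1 then 1 else 9) (Nat.min (if q2 then 2 else 9) (Nat.min (if q3 then 3 else 9) (if q4 then 4 else 9))))
    = Nat.min b (Nat.min (if p1 || q1 then 1 else 9) (Nat.min (if p2 || q2 then 2 else 9) (Nat.min (if p3 || q3 then 3 else 9) (if p4 || q4 then 4 else 9)))) := by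
  rw [show ∀ a b c : Nat, Nat.min (Nat.min a b) c = Nat.min a (Nat.min b c) from fun a b c => Nat.min_assoc a b c, min_merge]

/-- The fold over all key-contributed priorities equals the min of the four `any`-scan summaries. -/
theorem keymin_eq (keys : List String) (b : Nat) (hb : b ≤ 9) :
    (keys.flatMap (fun k => (pvKeyRules.filter (fun r => r.2 k)).map (·.1))).foldl Nat.min b
    = Nat.min b (Nat.min
        (if keys.any (fun k => PySem.Str.startswith k "double_blocks." || PySem.Str.startswith k "img_in." || PySem.Str.startswith k "text_encoders.") then 1 else 9)
        (Nat.min (if keys.any (fun k => PySem.Str.startswith k "cond_stage_model.") then 2 else 9)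
          (Nat.min (if keys.any (fun k => PySem.Str.isIn "open_clip.model.visual" k) then 3 else 9)
            (if keys.any (fun k => PySem.Str.startswith k "conditioner.embedders.") then 4 else 9)))) := by
  induction keys generalizing b with
  | nil => simp; omega
  | cons k ks ih =>
    simp only [List.flatMap_cons, List.foldl_append, List.any_cons, keyhead_eq k b hb]
    rw [ih _ (le_trans (Nat.min_le_left _ _) hb)]
    exact min_step b _ _ _ _ _ _ _ _

/-- Folding `Nat.min` over a candidate list contributed by one boolean condition. -/
theorem fold_if (c : Bool) (v b : Nat) (hb : b ≤ 9) :
    (if c then [v] else []).foldl Nat.min b = Nat.min b (if c then v else 9) := by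
  cases c <;> simp <;> omega

theorem min_le9 {x : Nat} (y : Nat) (h : x ≤ 9) : Nat.min x y ≤ 9 :=
  le_trans (Nat.min_le_left _ _) h

/-- The if-cascade over nine boolean conditions equals looking up the label of the minimum priority. -/
theorem cascade_eq_min (a b1 b2 b3 b4 n f s x : Bool) :
    (if a then "FLUX"
     else if b1 then "FLUX"
     else if b2 then "SD1.5"
     else if n || b3 then "SVD-XT"
     else if b4 then "SDXL-family"
     else if f then "FLUX"
     else if s then "SVD-XT"
     else if x then "SDXL-family"
     else "Unknown")
    = (PySem.Dict.mk pvLabels).getD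
        (Nat.min (Nat.min (Nat.min (Nat.min
          (Nat.min (Nat.min 9 (if a then 0 else 9))
            (Nat.min (if b1 then 1 else 9) (Nat.min (if b2 then 2 else 9) (Nat.min (if b3 then 3 else 9) (if b4 then 4 else 9)))))
          (if n then 3 else 9)) (if f then 5 else 9)) (if s then 6 else 9)) (if x then 7 else 9))
        "Unknown" := by
  revert a b1 b2 b3 b4 n f s x; decide

-- ===== VERDICT (by name: the statement is the Claim_ definition above) =====
theorem detect_checkpoint_architecture_py_spec : Claim_equal_detect_checkpoint_architecture_py := by
  intro checkpoint_name metadata keys _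
  show detect_checkpoint_architecture_py checkpoint_name metadata keys = detect_checkpoint_architecture_py_alt checkpoint_name metadata keys
  unfold detect_checkpoint_architecture_py detect_checkpoint_architecture_py_alt
  simp only [List.foldl_append]
  rw [fold_if _ _ _ (le_refl 9),
      keymin_eq _ _ (min_le9 _ (le_refl 9)),
      fold_if _ _ _ (min_le9 _ (min_le9 _ (le_refl 9))),
      fold_if _ _ _ (min_le9 _ (min_le9 _ (min_le9 _ (le_refl 9)))),
      fold_if _ _ _ (min_le9 _ (min_le9 _ (min_le9 _ (min_le9 _ (le_refl 9))))),
      fold_if _ _ _ (min_le9 _ (min_le9 _ (min_le9 _ (min_le9 _ (min_le9 _ (le_refl 9)))))),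
      cascade_eq_min]
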